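-- pv_equiv track=rewrite | github.com/FumiyukiKato/uldp-fl | src/epsilon_allocate_utils.py | group_by_closest_below
-- ===== SOURCE A (Python) =====
-- from typing import Dict, List
--
-- def group_by_closest_below(epsilon_u_dct: Dict, group_thresholds: List):
--     minimum = min(epsilon_u_dct.values())
--     group_thresholds = set(group_thresholds) | {minimum}
--     grouped = {
--         g: [] for g in group_thresholds
--     }  # Initialize the dictionary with empty lists for each group threshold
--     for key, value in epsilon_u_dct.items():
--         # Find the closest group threshold that is less than or equal to the value
--         closest_group = max([g for g in group_thresholds if g <= value], default=None)
--         # If a suitable group is found, append the key to the corresponding list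
--         if closest_group is not None:
--             grouped[closest_group].append(key)
--
--     return grouped
-- ===== SOURCE B (Python) =====
-- from bisect import bisect_right
--
--
-- def group_by_closest_below(epsilon_u_dct, group_thresholds):
--     minimum = min(epsilon_u_dct.values())
--     keys = list(dict.fromkeys(group_thresholds))
--     if minimum not in keys:
--         keys.append(minimum)
--     ts = sorted(keys)
--     buckets = {}
--     for key, value in epsilon_u_dct.items():
--         g = ts[bisect_right(ts, value) - 1]
--         buckets.setdefault(g, []).append(key)
--     return {g: buckets.get(g, []) for g in keys}
-- ===== Notes on version B (the rewrite author's own statement) =====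
-- stated objective: faster
-- what changed: B sorts the deduplicated thresholds once and assigns each entry to its bucket with one bisect_right lookup, accumulating only the non-empty buckets in a dict and assembling the full result afterwards, instead of A's per-entry rebuild-filter-and-max scan over all thresholds into a pre-initialized dict.
import Mathlib
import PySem

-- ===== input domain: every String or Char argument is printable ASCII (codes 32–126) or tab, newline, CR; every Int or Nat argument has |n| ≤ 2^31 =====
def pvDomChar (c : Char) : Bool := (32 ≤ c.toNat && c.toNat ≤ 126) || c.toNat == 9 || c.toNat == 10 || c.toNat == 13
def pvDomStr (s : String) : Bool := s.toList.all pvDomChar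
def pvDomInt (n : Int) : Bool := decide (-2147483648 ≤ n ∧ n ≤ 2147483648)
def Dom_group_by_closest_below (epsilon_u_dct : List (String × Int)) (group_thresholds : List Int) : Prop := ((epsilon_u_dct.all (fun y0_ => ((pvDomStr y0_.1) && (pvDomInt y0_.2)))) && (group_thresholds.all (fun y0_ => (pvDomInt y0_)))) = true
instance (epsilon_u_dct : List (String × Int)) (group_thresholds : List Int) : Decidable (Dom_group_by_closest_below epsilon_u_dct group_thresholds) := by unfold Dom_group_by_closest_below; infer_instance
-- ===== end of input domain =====

-- B sorts the deduplicated thresholds once and assigns each entry to its bucket by one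
-- bisect_right lookup, accumulating only the touched buckets and assembling the full
-- result dict afterwards (objective: faster).

-- ===== PORT A =====
def group_by_closest_below (epsilon_u_dct : List (String × Int)) (group_thresholds : List Int) : List (Int × List String) :=
  match PySem.List.min? (epsilon_u_dct.map Prod.snd) (fun x => x) with
  | none => []  -- min() of an empty dict raises ValueError; excluded by Pre_
  | some minimum =>
    -- group_thresholds = set(group_thresholds) | {minimum}
    let gts : PySem.Set Int := PySem.Set.union (PySem.Set.ofList group_thresholds) [minimum]
    -- grouped = {g: [] for g in group_thresholds}
    let grouped : PySem.Dict Int (List String) :=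
      gts.foldl (fun acc g => acc.insert g []) PySem.Dict.empty
    -- for key, value in epsilon_u_dct.items():
    --   closest_group = max([g for g in group_thresholds if g <= value], default=None)
    --   if closest_group is not None: grouped[closest_group].append(key)
    let grouped := epsilon_u_dct.foldl (fun acc kv =>
      match PySem.List.max? (gts.filter (fun g => decide (g ≤ kv.2))) (fun x => x) with
      | none => acc
      | some closest => acc.modify closest [] (fun l => l ++ [kv.1])) grouped
    grouped.items

-- ===== PORT B =====
def group_by_closest_below_alt (epsilon_u_dct : List (String × Int)) (group_thresholds : List Int) : List (Int × List String) :=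
  match PySem.List.min? (epsilon_u_dct.map Prod.snd) (fun x => x) with
  | none => []  -- min() of an empty dict raises ValueError; excluded by Pre_
  | some minimum =>
    -- keys = list(dict.fromkeys(group_thresholds)); if minimum not in keys: keys.append(minimum)
    let keys0 := PySem.List.dedup group_thresholds
    let keys := if minimum ∈ keys0 then keys0 else keys0 ++ [minimum]
    -- ts = sorted(keys)
    let ts := PySem.List.sorted keys (fun x => x)
    -- buckets = {}; for key, value in epsilon_u_dct.items():
    --   g = ts[bisect_right(ts, value) - 1]; buckets.setdefault(g, []).append(key)
    let buckets : PySem.Dict Int (List String) :=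
      epsilon_u_dct.foldl (fun acc kv =>
        match PySem.List.pyGet? ts ((PySem.List.bisectRight ts kv.2 : Int) - 1) with
        | none => acc  -- ts[...] IndexError, only possible for empty ts; unreachable under Pre_
        | some g => acc.modify g [] (fun l => l ++ [kv.1])) PySem.Dict.empty
    -- return {g: buckets.get(g, []) for g in keys}
    keys.map (fun g => (g, buckets.getD g []))

-- ===== PRECONDITION & SPEC =====
-- Pre_ excludes the empty dict, on which A raises ValueError (min of an empty sequence), and
-- association lists with duplicate keys, which cannot occur as a Python dict (dict(…) collapses them).
def Pre_group_by_closest_below (epsilon_u_dct : List (String × Int)) (group_thresholds : List Int) : Prop :=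
  epsilon_u_dct ≠ [] ∧ (epsilon_u_dct.map Prod.fst).Nodup
instance (epsilon_u_dct : List (String × Int)) (group_thresholds : List Int) : Decidable (Pre_group_by_closest_below epsilon_u_dct group_thresholds) := by unfold Pre_group_by_closest_below; infer_instance
def pvWitness_group_by_closest_below : (List (String × Int)) × List Int := ([("a", 2), ("b", 5), ("c", 3)], [3, 10])

def Spec_group_by_closest_below (epsilon_u_dct : List (String × Int)) (group_thresholds : List Int) (out : List (Int × List String)) : Prop := out = group_by_closest_below_alt epsilon_u_dct group_thresholds
instance (epsilon_u_dct : List (String × Int)) (group_thresholds : List Int) (out : List (Int × List String)) : Decidable (Spec_group_by_closest_below epsilon_u_dct group_thresholds out) := by unfold Spec_group_by_closest_below; infer_instance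

-- ===== CLAIM (what is proved, stated in full; the proofs are below) =====
def Claim_equal_group_by_closest_below : Prop := ∀ (epsilon_u_dct : List (String × Int)) (group_thresholds : List Int), Dom_group_by_closest_below epsilon_u_dct group_thresholds → Pre_group_by_closest_below epsilon_u_dct group_thresholds → Spec_group_by_closest_below epsilon_u_dct group_thresholds (group_by_closest_below epsilon_u_dct group_thresholds)

-- ===== LEMMAS AND PROOFS =====

-- The key list A iterates over (set(ts) | {m}) equals B's keys list (dedup ts, then append m if new).
lemma pv_keys_eq (ts : List Int) (m : Int) :
    PySem.Set.union (PySem.Set.ofList ts) [m]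
      = (if m ∈ PySem.List.dedup ts then PySem.List.dedup ts else PySem.List.dedup ts ++ [m]) := by
  simp [PySem.Set.union, PySem.Set.update, PySem.Set.add_eq_ite, PySem.List.dedup_eq_ofList]

-- On a list containing an element ≤ v, A's filter-and-max picks the same threshold as
-- B's bisect_right on the sorted list.
lemma pv_choice_eq (keys : List Int) (v : Int) (hex : ∃ g ∈ keys, g ≤ v) :
    PySem.List.max? (keys.filter (fun g => decide (g ≤ v))) (fun x => x)
      = PySem.List.pyGet? (PySem.List.sorted keys (fun x => x))
          ((PySem.List.bisectRight (PySem.List.sorted keys (fun x => x)) v : Int) - 1) := by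
  set s := PySem.List.sorted keys (fun x => x) with hs
  have hperm : s.Perm keys := PySem.List.sorted_perm keys (fun x => x) false
  have hpw : List.Pairwise (fun a b => a ≤ b) s := PySem.List.sorted_pairwise keys (fun x => x)
  obtain ⟨hile, hlt, hge⟩ := PySem.List.bisectRight_spec s v hpw
  set i := PySem.List.bisectRight s v with hi
  obtain ⟨g0, hg0mem, hg0le⟩ := hex
  have hg0s : g0 ∈ s := hperm.mem_iff.mpr hg0mem
  obtain ⟨j0, hj0, hj0eq⟩ := List.mem_iff_getElem.mp hg0s
  have hj0i : j0 < i := by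
    by_contra h
    have := hge j0 hj0 (le_of_not_gt h)
    rw [hj0eq] at this
    exact absurd hg0le (not_le.mpr this)
  have hipos : 1 ≤ i := Nat.lt_of_le_of_lt (Nat.zero_le _) hj0i
  have him1 : i - 1 < s.length := by omega
  have hcast : ((i : Int) - 1) = ((i - 1 : Nat) : Int) := by omega
  rw [hcast]
  have hrhs : PySem.List.pyGet? s ((i - 1 : Nat) : Int) = some s[i-1] := by
    simp [PySem.List.pyGet?, PySem.List.pyIdx?, him1]
  rw [hrhs]
  have hmle : s[i-1] ≤ v := hlt (i-1) him1 (by omega)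
  have hmmem : s[i-1] ∈ keys.filter (fun g => decide (g ≤ v)) :=
    List.mem_filter.mpr ⟨hperm.mem_iff.mp (List.getElem_mem him1), by simpa using hmle⟩
  have hmax : ∀ y ∈ keys.filter (fun g => decide (g ≤ v)), y ≤ s[i-1] := by
    intro y hy
    obtain ⟨hyk, hyv⟩ := List.mem_filter.mp hy
    have hyv' : y ≤ v := by simpa using hyv
    obtain ⟨j, hj, hjeq⟩ := List.mem_iff_getElem.mp (hperm.mem_iff.mpr hyk)
    have hji : j < i := by
      by_contra h
      have := hge j hj (le_of_not_gt h)
      rw [hjeq] at this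
      exact absurd hyv' (not_le.mpr this)
    calc y = s[j] := hjeq.symm
      _ ≤ s[i-1] := PySem.List.sorted_id_getElem_mono keys (by omega) (hs ▸ him1)
  cases hm : PySem.List.max? (keys.filter (fun g => decide (g ≤ v))) (fun x => x) with
  | none =>
    rw [PySem.List.max?_eq_none_iff] at hm
    exact absurd hmmem (hm ▸ List.not_mem_nil)
  | some m =>
    have h1 : m ≤ s[i-1] := hmax m (PySem.List.max?_mem hm)
    have h2 : s[i-1] ≤ m := PySem.List.max?_isMax hm _ hmmem
    simp [le_antisymm h1 h2]

-- set.update leaves a set unchanged when every added element is already in it.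
lemma pv_update_id (gs : List Int) : ∀ (s : List Int), (∀ g ∈ gs, g ∈ s) → PySem.Set.update s gs = s := by
  induction gs with
  | nil => intro s _; rfl
  | cons g gs ih =>
    intro s h
    have : PySem.Set.add s g = s := PySem.Set.add_of_mem (h g (List.mem_cons_self))
    simpa [PySem.Set.update, List.foldl_cons, this] using
      ih s (fun x hx => h x (List.mem_cons_of_mem _ hx))

-- set.update from a disjoint Nodup list appends it; hence set(s) = s for Nodup s.
lemma pv_update_append (xs : List Int) : ∀ (s : List Int), xs.Nodup → (∀ x ∈ xs, x ∉ s) →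
    PySem.Set.update s xs = s ++ xs := by
  induction xs with
  | nil => intro s _ _; simp [PySem.Set.update]
  | cons x xs ih =>
    intro s hnd hdisj
    have hxs : x ∉ s := hdisj x (List.mem_cons_self)
    have : PySem.Set.add s x = s ++ [x] := PySem.Set.add_of_not_mem hxs
    have hrec := ih (s ++ [x]) (List.nodup_cons.mp hnd).2 (by
      intro y hy
      simp only [List.mem_append, List.mem_singleton]
      rintro (h | rfl)
      · exact hdisj y (List.mem_cons_of_mem _ hy) h
      · exact (List.nodup_cons.mp hnd).1 hy)
    simp [PySem.Set.update, List.foldl_cons, this] at hrec ⊢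
    simpa [List.append_assoc] using hrec

lemma pv_ofList_self (s : List Int) (h : s.Nodup) : PySem.Set.ofList s = s := by
  have := pv_update_append s [] h (by simp)
  simpa [PySem.Set.ofList_eq_foldl, PySem.Set.update] using this

-- every default-[] lookup in the key-initialisation dict {g: [] for g in s} is [].
lemma pv_init_getD (s : List Int) : ∀ (d : PySem.Dict Int (List String)),
    (∀ j, d.getD j [] = []) → ∀ k,
    (s.foldl (fun acc g => acc.insert g ([] : List String)) d).getD k [] = [] := by
  induction s with
  | nil => intro d h k; exact h k
  | cons g s ih =>
    intro d h k
    simp only [List.foldl_cons]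
    exact ih (d.insert g []) (by
      intro j
      rw [PySem.Dict.getD_insert]
      split_ifs with hj
      · rfl
      · exact h j) k

-- ===== VERDICT (by name: the statement is the Claim_ definition above) =====
theorem group_by_closest_below_spec : Claim_equal_group_by_closest_below := by
  intro d ts _ hpre
  unfold Spec_group_by_closest_below
  have hmapne : d.map Prod.snd ≠ [] := by simpa using hpre.1
  obtain ⟨minimum, hm⟩ : ∃ m, PySem.List.min? (d.map Prod.snd) (fun x => x) = some m := by
    cases h : PySem.List.min? (d.map Prod.snd) (fun x => x) with
    | none => exact absurd ((PySem.List.min?_eq_none_iff _ _).mp h) hmapne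
    | some m => exact ⟨m, rfl⟩
  unfold group_by_closest_below group_by_closest_below_alt
  rw [hm]
  simp only [pv_keys_eq]
  set keys := (if minimum ∈ PySem.List.dedup ts then PySem.List.dedup ts else PySem.List.dedup ts ++ [minimum]) with hkeys
  have hkeys' : keys = PySem.Set.add (PySem.Set.ofList ts) minimum := by
    rw [PySem.Set.add_eq_ite, hkeys, PySem.List.dedup_eq_ofList]
  have hnd : keys.Nodup := by
    rw [hkeys']; exact PySem.Set.nodup_add _ _ (PySem.Set.nodup_ofList ts)
  have hmin_mem : minimum ∈ keys := by
    rw [hkeys']; simp [PySem.Set.add_eq_ite]; split_ifs with h <;> simp [h]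
  -- the common bucket of an entry: A's filter-and-max result
  set bkt : Int → Int := fun v =>
    (PySem.List.max? (keys.filter (fun g => decide (g ≤ v))) (fun x => x)).getD 0 with hbkt
  have hsome : ∀ kv ∈ d, PySem.List.max? (keys.filter (fun g => decide (g ≤ kv.2))) (fun x => x) = some (bkt kv.2) := by
    intro kv hkv
    have hminle : minimum ≤ kv.2 :=
      PySem.List.min?_isMin hm kv.2 (List.mem_map.mpr ⟨kv, hkv, rfl⟩)
    cases h : PySem.List.max? (keys.filter (fun g => decide (g ≤ kv.2))) (fun x => x) with
    | none =>
      rw [PySem.List.max?_eq_none_iff] at h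
      have : minimum ∈ keys.filter (fun g => decide (g ≤ kv.2)) :=
        List.mem_filter.mpr ⟨hmin_mem, by simpa using hminle⟩
      exact absurd this (h ▸ List.not_mem_nil)
    | some m => simp [hbkt, h]
  have hbmem : ∀ kv ∈ d, bkt kv.2 ∈ keys := by
    intro kv hkv
    have := PySem.List.max?_mem (hsome kv hkv)
    exact (List.mem_filter.mp this).1
  -- rewrite both loops as the same fold of (bucket, key) pairs
  have hAfold : ∀ (D0 : PySem.Dict Int (List String)),
      d.foldl (fun acc kv =>
        match PySem.List.max? (keys.filter (fun g => decide (g ≤ kv.2))) (fun x => x) with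
        | none => acc
        | some closest => acc.modify closest [] (fun l => l ++ [kv.1])) D0
      = (d.map (fun kv => (bkt kv.2, kv.1))).foldl
          (fun acc p => acc.modify p.1 [] (fun l => l ++ [p.2])) D0 := by
    intro D0
    rw [List.foldl_map]
    apply PySem.List.foldl_congr_mem
    intro acc kv hkv
    rw [hsome kv hkv]
  have hBfold :
      d.foldl (fun acc kv =>
        match PySem.List.pyGet? (PySem.List.sorted keys (fun x => x))
            ((PySem.List.bisectRight (PySem.List.sorted keys (fun x => x)) kv.2 : Int) - 1) with
        | none => acc
        | some g => acc.modify g [] (fun l => l ++ [kv.1])) PySem.Dict.empty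
      = (d.map (fun kv => (bkt kv.2, kv.1))).foldl
          (fun acc p => acc.modify p.1 [] (fun l => l ++ [p.2])) PySem.Dict.empty := by
    rw [List.foldl_map]
    apply PySem.List.foldl_congr_mem
    intro acc kv hkv
    have hminle : minimum ≤ kv.2 :=
      PySem.List.min?_isMin hm kv.2 (List.mem_map.mpr ⟨kv, hkv, rfl⟩)
    rw [← pv_choice_eq keys kv.2 ⟨minimum, hmin_mem, hminle⟩, hsome kv hkv]
  rw [hAfold, hBfold]
  set L := d.map (fun kv => (bkt kv.2, kv.1)) with hL
  have hLkeys : ∀ g ∈ L.map Prod.fst, g ∈ keys := by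
    intro g hg
    simp only [hL, List.map_map, List.mem_map] at hg
    obtain ⟨kv, hkv, rfl⟩ := hg
    exact hbmem kv hkv
  -- the initial dict {g: [] for g in keys}
  set D0 : PySem.Dict Int (List String) :=
    keys.foldl (fun acc g => acc.insert g []) PySem.Dict.empty with hD0
  have hD0keys : D0.keys = keys := by
    rw [hD0, PySem.Dict.keys_foldl_insert]
    simpa [PySem.Dict.keys_empty] using pv_ofList_self keys hnd
  set dA := L.foldl (fun acc p => acc.modify p.1 [] (fun l => l ++ [p.2])) D0 with hdA
  have hdAkeys : dA.keys = keys := by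
    rw [hdA, PySem.Dict.keys_foldl_modify_key, hD0keys]
    exact pv_update_id _ _ hLkeys
  have hdAnd : dA.keys.Nodup := hdAkeys ▸ hnd
  rw [PySem.Dict.items_eq_map_keys dA hdAnd ([] : List String), hdAkeys]
  apply List.map_congr_left
  intro g _
  have hA : dA.getD g [] = (L.filter (fun p => p.1 == g)).map (·.2) := by
    rw [hdA, PySem.Dict.getD_foldl_modify_append]
    rw [hD0]
    rw [pv_init_getD keys PySem.Dict.empty (fun j => PySem.Dict.getD_empty j _) g]
    simp
  have hB : (L.foldl (fun acc p => acc.modify p.1 [] (fun l => l ++ [p.2])) PySem.Dict.empty).getD g []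
      = (L.filter (fun p => p.1 == g)).map (·.2) := by
    rw [PySem.Dict.getD_foldl_modify_append]
    simp
  rw [hA, hB]
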